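-- pv_equiv track=rewrite | github.com/Abdennasserbedroune/Pathwise | backend/app/api/v1/analyze.py | _contains_any
-- ===== SOURCE A (Python) =====
-- from typing import Iterable, List, Set
--
-- def _contains_any(text: str, keys: Iterable[str]) -> List[str]:
--     keys_norm = [k.lower() for k in keys]
--     text_norm = text.lower()
--     found: List[str] = []
--     for k in keys_norm:
--         if k in text_norm:
--             found.append(k)
--     return found
-- ===== SOURCE B (Python) =====
-- def _contains_any(text, keys):
--     # Windowed re-implementation: one pass over the text per DISTINCT key length
--     # builds a hash set of all substrings of that length; each key is then a set lookup.
--     text_norm = text.lower()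
--     n = len(text_norm)
--     keys_norm = [k.lower() for k in keys]
--     windows = {}
--     for k in keys_norm:
--         L = len(k)
--         if L <= n and L not in windows:
--             windows[L] = {text_norm[i:i + L] for i in range(n - L + 1)}
--     return [k for k in keys_norm if len(k) <= n and k in windows[len(k)]]
-- ===== Notes on version B (the rewrite author's own statement) =====
-- stated objective: faster
-- what changed: Instead of running Python's substring search over the text once per key, B builds, for each distinct key length L, the hash set of all length-L windows of the lowercased text in one pass, and then answers each key by a single set lookup.
import Mathlib
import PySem

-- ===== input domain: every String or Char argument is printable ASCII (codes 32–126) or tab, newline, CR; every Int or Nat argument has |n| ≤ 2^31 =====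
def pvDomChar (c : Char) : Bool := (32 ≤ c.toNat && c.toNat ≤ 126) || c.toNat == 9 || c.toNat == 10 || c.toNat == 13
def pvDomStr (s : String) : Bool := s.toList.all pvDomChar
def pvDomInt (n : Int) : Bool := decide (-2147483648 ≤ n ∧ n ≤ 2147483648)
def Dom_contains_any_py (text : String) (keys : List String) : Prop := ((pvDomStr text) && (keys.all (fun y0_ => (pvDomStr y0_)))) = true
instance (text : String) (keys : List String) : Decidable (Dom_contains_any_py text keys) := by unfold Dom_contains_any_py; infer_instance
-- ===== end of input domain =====

-- B replaces A's per-key substring scan by hash sets of text windows, one per distinct key length (objective: faster; measured faster in a timing run); equal return value proved.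

-- ===== PORT A =====
def contains_any_py (text : String) (keys : List String) : List String :=
  let keys_norm := keys.map (fun k => PySem.Str.lower k)
  let text_norm := PySem.Str.lower text
  keys_norm.foldl (fun found k => if PySem.Str.isIn k text_norm then found ++ [k] else found) []

-- ===== PORT B =====
-- the set comprehension {text_norm[i:i+L] for i in range(n - L + 1)}
def pvWindows (t : String) (L : Int) : PySem.Set String :=
  PySem.Set.ofList ((PySem.List.pyRange 0 (PySem.Str.len t - L + 1) 1).map
    (fun i => PySem.Str.slice t (some i) (some (i + L))))

-- the body of Source B's first loop (L abbreviates len(k))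
def pvStep (t : String) (n : Int) (d : PySem.Dict Int (PySem.Set String)) (k : String) :
    PySem.Dict Int (PySem.Set String) :=
  if PySem.Str.len k ≤ n ∧ d.contains (PySem.Str.len k) = false then
    d.insert (PySem.Str.len k) (pvWindows t (PySem.Str.len k))
  else d

def contains_any_py_alt (text : String) (keys : List String) : List String :=
  let text_norm := PySem.Str.lower text
  let n := PySem.Str.len text_norm
  let keys_norm := keys.map (fun k => PySem.Str.lower k)
  let windows := keys_norm.foldl (pvStep text_norm n) PySem.Dict.empty
  keys_norm.filter (fun k =>
    decide (PySem.Str.len k ≤ n) &&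
      PySem.Set.contains (windows.getD (PySem.Str.len k) PySem.Set.empty) k)

-- ===== PRECONDITION & SPEC =====
def Spec_contains_any_py (text : String) (keys : List String) (out : List String) : Prop := out = contains_any_py_alt text keys
instance (text : String) (keys : List String) (out : List String) : Decidable (Spec_contains_any_py text keys out) := by unfold Spec_contains_any_py; infer_instance

-- ===== CLAIM (what is proved, stated in full; the proofs are below) =====
def Claim_equal_contains_any_py : Prop := ∀ (text : String) (keys : List String), Dom_contains_any_py text keys → Spec_contains_any_py text keys (contains_any_py text keys)

-- ===== LEMMAS AND PROOFS =====

-- dict membership only grows along the fold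
lemma pv_fold_mono (t : String) (n : Int) (ks : List String)
    (d : PySem.Dict Int (PySem.Set String)) (L : Int)
    (h : d.contains L = true) :
    ((ks.foldl (pvStep t n) d).contains L) = true := by
  induction ks generalizing d with
  | nil => exact h
  | cons a ks ih =>
    apply ih
    unfold pvStep
    split
    · rw [PySem.Dict.contains_insert]; simp [h]
    · exact h

-- every value stored in the windows dict is the window set for its key length
lemma pv_fold_sound (t : String) (n : Int) (ks : List String)
    (d : PySem.Dict Int (PySem.Set String))
    (hd : ∀ L s, d.get? L = some s → s = pvWindows t L) :
    ∀ L s, (ks.foldl (pvStep t n) d).get? L = some s → s = pvWindows t L := by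
  induction ks generalizing d with
  | nil => exact hd
  | cons a ks ih =>
    intro L s h
    refine ih _ ?_ L s h
    intro L' s' h'
    unfold pvStep at h'
    split at h'
    · rw [PySem.Dict.get?_insert] at h'
      split at h'
      · rename_i hEq
        injection h' with h''
        rw [← h'', hEq]
      · exact hd _ _ h'
    · exact hd _ _ h'

-- the windows dict covers every key length ≤ n occurring in the list
lemma pv_fold_covers (t : String) (n : Int) (ks : List String)
    (d : PySem.Dict Int (PySem.Set String)) (k : String)
    (hk : k ∈ ks) (hl : PySem.Str.len k ≤ n) :
    ((ks.foldl (pvStep t n) d).contains (PySem.Str.len k)) = true := by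
  induction ks generalizing d with
  | nil => cases hk
  | cons a ks ih =>
    rcases List.mem_cons.mp hk with h | h
    · subst h
      rw [List.foldl_cons]
      apply pv_fold_mono
      unfold pvStep
      split
      · exact PySem.Dict.contains_insert_self _ _ _
      · rename_i hg
        rw [not_and] at hg
        simpa using hg hl
    · exact ih _ h

-- set-of-windows membership agrees with Python's substring test when the key fits
lemma pv_windows_mem (t k : String) (h : PySem.Str.len k ≤ PySem.Str.len t) :
    PySem.Set.contains (pvWindows t (PySem.Str.len k)) k = PySem.Str.isIn k t := by
  rw [Bool.eq_iff_iff, PySem.Set.contains_iff]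
  unfold pvWindows
  rw [PySem.Set.mem_ofList, List.mem_map,
    PySem.Str.isIn_eq, ← PySem.Chars.exists_prefix_drop_iff_isIn]
  simp only [PySem.Str.len_eq] at h ⊢
  constructor
  · rintro ⟨i, hi, hEq⟩
    rw [PySem.List.mem_pyRange_one] at hi
    obtain ⟨h0, _⟩ := hi
    lift i to ℕ using h0 with jn
    refine ⟨jn, ?_⟩
    rw [List.prefix_iff_eq_take]
    conv_lhs => rw [← hEq]
    rw [PySem.Str.toList_slice, PySem.Chars.slice_eq_listSlice,
      PySem.List.slice_natCast_add]
  · rintro ⟨j, hpre⟩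
    have hN : (k.toList.length : Int) ≤ (t.toList.length : Int) := h
    set jn : ℕ := min j t.toList.length with hjn
    have hpre' : k.toList <+: t.toList.drop jn := by
      by_cases hj : j ≤ t.toList.length
      · rwa [hjn, min_eq_left hj]
      · have hnil : t.toList.drop j = [] := List.drop_eq_nil_of_le (by omega)
        have hk0 : k.toList = [] := List.prefix_nil.mp (hnil ▸ hpre)
        simp [hk0]
    have hlen : k.toList.length ≤ t.toList.length - jn := by
      simpa using hpre'.length_le
    have hmin : jn ≤ t.toList.length := hjn ▸ min_le_right _ _
    have hsum : jn + k.toList.length ≤ t.toList.length := by omega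
    refine ⟨(jn : Int), ?_, ?_⟩
    · rw [PySem.List.mem_pyRange_one]
      refine ⟨Int.natCast_nonneg _, ?_⟩
      omega
    · rw [← String.toList_inj, PySem.Str.toList_slice, PySem.Chars.slice_eq_listSlice,
        PySem.List.slice_natCast_add]
      exact (List.prefix_iff_eq_take.mp hpre').symm

-- ===== VERDICT (by name: the statement is the Claim_ definition above) =====
theorem contains_any_py_spec : Claim_equal_contains_any_py := by
  unfold Claim_equal_contains_any_py
  intro text keys _
  simp only [Spec_contains_any_py, contains_any_py, contains_any_py_alt]
  rw [PySem.List.foldl_append_if_eq_filter, List.nil_append]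
  apply List.filter_congr
  intro x hx
  by_cases hle : PySem.Str.len x ≤ PySem.Str.len (PySem.Str.lower text)
  · have hcov := pv_fold_covers (PySem.Str.lower text) (PySem.Str.len (PySem.Str.lower text))
      (keys.map (fun k => PySem.Str.lower k)) PySem.Dict.empty x hx hle
    rw [PySem.Dict.contains_eq_isSome_get?] at hcov
    obtain ⟨s, hs⟩ := Option.isSome_iff_exists.mp hcov
    have hsw := pv_fold_sound (PySem.Str.lower text) (PySem.Str.len (PySem.Str.lower text))
      (keys.map (fun k => PySem.Str.lower k)) PySem.Dict.empty
      (by intro L s h; rw [PySem.Dict.get?_empty] at h; cases h) _ _ hs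
    rw [PySem.Dict.getD_eq_get?_getD, hs, Option.getD_some, hsw,
      pv_windows_mem (PySem.Str.lower text) x hle, decide_eq_true hle, Bool.true_and]
  · have hfalse : PySem.Str.isIn x (PySem.Str.lower text) = false := by
      rw [PySem.Str.isIn_eq, PySem.Chars.isIn_eq_false_iff]
      intro hinf
      have hl := hinf.length_le
      simp only [PySem.Str.len_eq] at hle
      omega
    rw [hfalse, decide_eq_false hle, Bool.false_and]
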